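-- pv_equiv track=rewrite | github.com/Jaimatt/AdventOfCode | 2024/7B.py | calculate
-- ===== SOURCE A (Python) =====
-- def calculate(goal,vals):
--     # Base case: end of calculation
--     if len(vals) == 1:
--         # Return true or false depending on whether it meets the goal
--         return goal == vals[0]
--
--     # Recurse case: more calculations
--     else:
--         # this is just a bit of boolean logic. If any call returns true, it will return true.
--         add = calculate(goal,[vals[0] + vals[1]] + vals[2:])
--         mul = calculate(goal,[vals[0] * vals[1]] + vals[2:])
--         concat = calculate(goal,[ int(str(vals[0])+str(vals[1]))] + vals[2:])
--         return add or mul or concat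
-- ===== SOURCE B (Python) =====
-- def calculate(goal, vals):
--     # Iterative forward reachability: frontier of all values obtainable from the prefix.
--     frontier = {vals[0]}
--     for v in vals[1:]:
--         nxt = set()
--         for a in frontier:
--             nxt.add(a + v)
--             nxt.add(a * v)
--             nxt.add(int(str(a) + str(v)))
--         frontier = nxt
--     return goal in frontier
-- ===== Notes on version B (the rewrite author's own statement) =====
-- stated objective: alternative
-- what changed: Replaced the triple-branching recursion over suffixes by an iterative forward pass that keeps a deduplicated set of all values reachable from the prefix and tests goal membership at the end.
import Mathlib
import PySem

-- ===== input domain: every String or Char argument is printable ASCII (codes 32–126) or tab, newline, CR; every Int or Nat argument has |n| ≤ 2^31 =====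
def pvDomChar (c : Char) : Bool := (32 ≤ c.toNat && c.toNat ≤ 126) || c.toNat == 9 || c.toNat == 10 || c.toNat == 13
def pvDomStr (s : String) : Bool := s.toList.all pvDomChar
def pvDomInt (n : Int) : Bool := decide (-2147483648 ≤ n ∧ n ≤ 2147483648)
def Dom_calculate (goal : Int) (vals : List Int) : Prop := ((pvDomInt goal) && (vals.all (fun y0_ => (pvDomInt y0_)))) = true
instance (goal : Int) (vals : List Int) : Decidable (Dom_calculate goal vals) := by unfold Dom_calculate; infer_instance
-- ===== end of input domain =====

-- B replaces A's triple-branching recursion by an iterative set-frontier forward pass (alternative decomposition, same results).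


-- ===== PORT A =====
-- int(str(a)+str(v)); total form: 0 where Python raises ValueError (v < 0), excluded by Pre_
def pvConcat (a v : Int) : Int :=
  (PySem.Int.ofStr? (PySem.Int.toStr a ++ PySem.Int.toStr v)).getD 0

-- A's recursion always acts on the current head and the rest: [vals[0]+vals[1]] + vals[2:] is (head, rest)
-- with head replaced; pvCalcA carries that head explicitly (same calls, same order, structural recursion).
def pvCalcA (goal a : Int) (rest : List Int) : Bool :=
  match rest with
  | [] => goal == a            -- len(vals) == 1: base case
  | b :: rest =>
      let add := pvCalcA goal (a + b) rest
      let mul := pvCalcA goal (a * b) rest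
      let concat := pvCalcA goal (pvConcat a b) rest
      add || mul || concat

def calculate (goal : Int) (vals : List Int) : Bool :=
  match vals with
  | [] => false   -- Python raises IndexError here; excluded by Pre_
  | a :: rest => pvCalcA goal a rest

-- ===== PORT B =====
def pvStep (frontier : PySem.Set Int) (v : Int) : PySem.Set Int :=
  frontier.foldl
    (fun nxt a => ((nxt.add (a + v)).add (a * v)).add (pvConcat a v))
    PySem.Set.empty

def calculate_alt (goal : Int) (vals : List Int) : Bool :=
  match vals with
  | [] => false   -- Python raises IndexError here; excluded by Pre_
  | a :: rest =>
      let frontier := rest.foldl pvStep (PySem.Set.ofList [a])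
      PySem.Set.contains frontier goal

-- ===== PRECONDITION & SPEC =====
-- A raises IndexError on [] and ValueError (int of a string with an inner '-') when any value after the first is negative.
def Pre_calculate (goal : Int) (vals : List Int) : Prop :=
  vals ≠ [] ∧ ∀ v ∈ vals.tail, 0 ≤ v
instance (goal : Int) (vals : List Int) : Decidable (Pre_calculate goal vals) := by
  unfold Pre_calculate; infer_instance

def pvWitness_calculate : Int × List Int := (29, [2, 9, 2])

def Spec_calculate (goal : Int) (vals : List Int) (out : Bool) : Prop := out = calculate_alt goal vals
instance (goal : Int) (vals : List Int) (out : Bool) : Decidable (Spec_calculate goal vals out) := by unfold Spec_calculate; infer_instance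

-- ===== CLAIM (what is proved, stated in full; the proofs are below) =====
def Claim_equal_calculate : Prop := ∀ (goal : Int) (vals : List Int), Dom_calculate goal vals → Pre_calculate goal vals → Spec_calculate goal vals (calculate goal vals)

-- ===== LEMMAS AND PROOFS =====

-- membership in one frontier step
theorem mem_pvStep (S : PySem.Set Int) (v x : Int) :
    x ∈ pvStep S v ↔ ∃ a ∈ S, x = a + v ∨ x = a * v ∨ x = pvConcat a v := by
  unfold pvStep
  suffices h : ∀ (L : List Int) (acc : PySem.Set Int),
      x ∈ L.foldl (fun nxt a => ((nxt.add (a + v)).add (a * v)).add (pvConcat a v)) acc ↔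
        x ∈ acc ∨ ∃ a ∈ L, x = a + v ∨ x = a * v ∨ x = pvConcat a v by
    have := h S PySem.Set.empty
    simpa [PySem.Set.empty] using this
  intro L
  induction L with
  | nil => simp
  | cons a L ih =>
      intro acc
      simp only [List.foldl_cons, ih, PySem.Set.mem_add, List.mem_cons]
      constructor
      · rintro ((((h | h) | h) | h) | ⟨b, hb, hd⟩)
        · exact Or.inl h
        · exact Or.inr ⟨a, Or.inl rfl, Or.inl h⟩
        · exact Or.inr ⟨a, Or.inl rfl, Or.inr (Or.inl h)⟩
        · exact Or.inr ⟨a, Or.inl rfl, Or.inr (Or.inr h)⟩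
        · exact Or.inr ⟨b, Or.inr hb, hd⟩
      · rintro (h | ⟨b, hb | hb, hd⟩)
        · exact Or.inl (Or.inl (Or.inl (Or.inl h)))
        · subst hb
          rcases hd with h | h | h
          · exact Or.inl (Or.inl (Or.inl (Or.inr h)))
          · exact Or.inl (Or.inl (Or.inr h))
          · exact Or.inl (Or.inr h)
        · exact Or.inr ⟨b, hb, hd⟩

-- main invariant: goal is in the folded frontier iff some frontier element makes A succeed on the rest
theorem frontier_inv (goal : Int) (rest : List Int) :
    ∀ (S : PySem.Set Int),
      (PySem.Set.contains (rest.foldl pvStep S) goal = true) ↔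
        ∃ a ∈ S, pvCalcA goal a rest = true := by
  induction rest with
  | nil =>
      intro S
      simp only [List.foldl_nil, PySem.Set.contains_iff, pvCalcA, beq_iff_eq]
      constructor
      · intro h; exact ⟨goal, h, rfl⟩
      · rintro ⟨a, ha, h⟩; rw [h]; exact ha
  | cons v rest ih =>
      intro S
      rw [List.foldl_cons, ih]
      constructor
      · rintro ⟨b, hb, hcalc⟩
        rcases (mem_pvStep S v b).1 hb with ⟨a, ha, hab⟩
        refine ⟨a, ha, ?_⟩
        show (pvCalcA goal (a + v) rest || pvCalcA goal (a * v) rest || pvCalcA goal (pvConcat a v) rest) = true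
        rcases hab with h | h | h <;> rw [h] at hcalc <;> simp [hcalc]
      · rintro ⟨a, ha, hcalc⟩
        simp only [pvCalcA, Bool.or_eq_true] at hcalc
        rcases hcalc with (h | h) | h
        · exact ⟨a + v, (mem_pvStep S v _).2 ⟨a, ha, Or.inl rfl⟩, h⟩
        · exact ⟨a * v, (mem_pvStep S v _).2 ⟨a, ha, Or.inr (Or.inl rfl)⟩, h⟩
        · exact ⟨pvConcat a v, (mem_pvStep S v _).2 ⟨a, ha, Or.inr (Or.inr rfl)⟩, h⟩

-- ===== VERDICT (by name: the statement is the Claim_ definition above) =====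
theorem calculate_spec : Claim_equal_calculate := by
  intro goal vals _ hpre
  unfold Spec_calculate
  match vals with
  | [] => exact absurd rfl hpre.1
  | a :: rest =>
      unfold calculate calculate_alt
      rw [Bool.eq_iff_iff, frontier_inv]
      constructor
      · intro h
        exact ⟨a, by simp [PySem.Set.mem_ofList], h⟩
      · rintro ⟨b, hb, h⟩
        have : b = a := by simpa [PySem.Set.mem_ofList] using hb
        simpa [this] using h
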